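-- pv_equiv track=rewrite | github.com/theguyoverthere/CMU15-112-Spring17 | src/Week4/Practice/repeatingPattern.py | repeatingPattern
-- ===== SOURCE A (Python) =====
-- def repeatingPattern(a):
--     count = a.count(a[0])
--
--     if len(a) % count == 0:
--         lo = 0
--         hi = int(len(a) / count)
--         step = hi
--
--         for index in range(count - 1):
--             if a[lo: hi] != a[hi: hi + step]:
--                 return False
--             lo += step
--             hi += step
--
--         return True
--
--     return False
-- ===== SOURCE B (Python) =====
-- def repeatingPattern(a):
--     count = a.count(a[0])
--     if len(a) % count != 0:
--         return False
--     step = len(a) // count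
--     return a == a[:step] * count
-- ===== Notes on version B (the rewrite author's own statement) =====
-- stated objective: simpler
-- what changed: The pairwise loop comparing each adjacent pair of blocks is replaced by building the expected repetition a[:step]*count once and comparing it with a in a single equality.
import Mathlib
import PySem

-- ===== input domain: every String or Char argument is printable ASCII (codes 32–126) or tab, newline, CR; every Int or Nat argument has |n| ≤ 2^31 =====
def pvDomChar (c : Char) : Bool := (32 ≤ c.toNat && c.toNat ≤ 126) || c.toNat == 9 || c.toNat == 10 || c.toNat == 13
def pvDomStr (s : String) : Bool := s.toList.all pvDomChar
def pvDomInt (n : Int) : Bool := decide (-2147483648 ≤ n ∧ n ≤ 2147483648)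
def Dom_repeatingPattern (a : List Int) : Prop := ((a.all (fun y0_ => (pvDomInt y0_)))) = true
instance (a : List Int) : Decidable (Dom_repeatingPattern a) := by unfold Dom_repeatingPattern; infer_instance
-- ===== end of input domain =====

-- B replaces A's loop over adjacent block pairs by one comparison of a with a[:step]*count (simpler decomposition, same cost).

-- ===== PORT A =====
-- the 'for index in range(count - 1)' loop with early 'return False'; state (lo, hi) as in A
def repeatingPatternLoop (a : List Int) (step : Int) : Nat → Int → Int → Bool
  | 0, _, _ => true
  | n + 1, lo, hi =>
    if PySem.List.slice a (some lo) (some hi) ≠ PySem.List.slice a (some hi) (some (hi + step)) then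
      false
    else
      repeatingPatternLoop a step n (lo + step) (hi + step)

def repeatingPattern (a : List Int) : Bool :=
  let count : Nat := a.count (PySem.List.pyGetD a 0 0)   -- a.count(a[0]); a[0] total under Pre_
  if PySem.Int.mod (a.length : Int) (count : Int) = 0 then
    -- int(len(a)/count): exact here since count divides len(a), equals floor division
    let hi : Int := PySem.Int.floordiv (a.length : Int) (count : Int)
    repeatingPatternLoop a hi (count - 1) 0 hi
  else
    false

-- ===== PORT B =====
def repeatingPattern_alt (a : List Int) : Bool :=
  let count : Nat := a.count (PySem.List.pyGetD a 0 0)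
  if PySem.Int.mod (a.length : Int) (count : Int) ≠ 0 then
    false
  else
    let step : Int := PySem.Int.floordiv (a.length : Int) (count : Int)
    decide (a = (List.replicate count (PySem.List.slice a none (some step))).flatten)

-- ===== PRECONDITION & SPEC =====
-- Pre_ excludes only the empty list, on which A's a[0] raises IndexError.
def Pre_repeatingPattern (a : List Int) : Prop := a ≠ []
instance (a : List Int) : Decidable (Pre_repeatingPattern a) := by unfold Pre_repeatingPattern; infer_instance
def pvWitness_repeatingPattern : List Int := [1, 2, 1, 2]

def Spec_repeatingPattern (a : List Int) (out : Bool) : Prop := out = repeatingPattern_alt a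
instance (a : List Int) (out : Bool) : Decidable (Spec_repeatingPattern a out) := by unfold Spec_repeatingPattern; infer_instance

-- ===== CLAIM (what is proved, stated in full; the proofs are below) =====
def Claim_equal_repeatingPattern : Prop := ∀ (a : List Int), Dom_repeatingPattern a → Pre_repeatingPattern a → Spec_repeatingPattern a (repeatingPattern a)

-- ===== LEMMAS AND PROOFS =====

-- block j = a[j*step : (j+1)*step]
def pvBlock (a : List Int) (step j : Nat) : List Int := (a.drop (j * step)).take step

lemma pvDrop_block (a : List Int) (step j : Nat) :
    a.drop (j * step) = pvBlock a step j ++ a.drop ((j + 1) * step) := by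
  have : a.drop ((j + 1) * step) = (a.drop (j * step)).drop step := by
    rw [List.drop_drop]; ring_nf
  rw [this, pvBlock, List.take_append_drop]

lemma pvLoop_characterization (a : List Int) (step : Nat) :
    ∀ (n j : Nat), a.length = (j + n + 1) * step →
      repeatingPatternLoop a (step : Int) n ((j * step : Nat) : Int) (((j + 1) * step : Nat) : Int)
        = decide (a.drop (j * step) = (List.replicate (n + 1) (pvBlock a step j)).flatten) := by
  intro n
  induction n with
  | zero =>
    intro j hlen
    have hd : (a.drop (j * step)).length = step := by
      rw [List.length_drop, hlen, show (j + 0 + 1) * step = j * step + step from by ring]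
      omega
    have hbk : pvBlock a step j = a.drop (j * step) := by
      rw [pvBlock]; exact List.take_of_length_le (le_of_eq hd)
    simp [repeatingPatternLoop, List.replicate_one, hbk]
  | succ n ih =>
    intro j hlen
    have hcast : ((( j + 1) * step : Nat) : Int) + (step : Int) = (((j + 2) * step : Nat) : Int) := by
      push_cast; ring
    have hcast0 : ((j * step : Nat) : Int) + (step : Int) = (((j + 1) * step : Nat) : Int) := by
      push_cast; ring
    have hs1 : PySem.List.slice a (some ((j * step : Nat) : Int)) (some (((j + 1) * step : Nat) : Int))
        = pvBlock a step j := by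
      rw [PySem.List.slice_natCast, pvBlock]
      congr 1; rw [show (j + 1) * step = j * step + step from by ring]; omega
    have hs2 : PySem.List.slice a (some (((j + 1) * step : Nat) : Int)) (some (((j + 2) * step : Nat) : Int))
        = pvBlock a step (j + 1) := by
      rw [PySem.List.slice_natCast, pvBlock]
      congr 1; rw [show (j + 2) * step = (j + 1) * step + step from by ring]; omega
    have hlen1 : (a.drop (j * step)).length = (n + 2) * step := by
      rw [List.length_drop, hlen, show (j + (n + 1) + 1) * step = j * step + (n + 2) * step from by ring]
      omega
    have hlenb : (pvBlock a step j).length = step := by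
      rw [pvBlock, List.length_take, hlen1]
      exact Nat.min_eq_left (Nat.le_mul_of_pos_left step (by omega))
    rw [repeatingPatternLoop]
    rw [hcast, hs1, hs2]
    by_cases hb : pvBlock a step j = pvBlock a step (j + 1)
    · rw [if_neg (by simp [hb])]
      rw [hcast0, ih (j + 1) (by rw [hlen]; ring)]
      simp only [decide_eq_decide]
      rw [List.replicate_succ (n := n + 1), List.flatten_cons, pvDrop_block a step j, hb,
          List.append_cancel_left_eq]
    · rw [if_pos (by simpa using hb)]
      have hnp : ¬ (a.drop (j * step) = (List.replicate (n + 1 + 1) (pvBlock a step j)).flatten) := by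
        intro h
        apply hb
        rw [List.replicate_succ, List.flatten_cons, pvDrop_block a step j,
            List.append_cancel_left_eq] at h
        -- h : a.drop ((j+1)*step) = flatten (replicate (n+1) (block j)); take step of both sides
        have h2 : pvBlock a step (j + 1) = pvBlock a step j := by
          rw [pvBlock, h, List.replicate_succ, List.flatten_cons,
              List.take_append_of_le_length (by rw [hlenb]),
              List.take_of_length_le (le_of_eq hlenb)]
        exact h2.symm
      simp [hnp]

lemma pvPorts_agree (a : List Int) (h : a ≠ []) :
    repeatingPattern a = repeatingPattern_alt a := by
  obtain ⟨x, xs, rfl⟩ := List.exists_cons_of_ne_nil h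
  set b := x :: xs with hb
  unfold repeatingPattern repeatingPattern_alt
  simp only []
  set c : Nat := b.count (PySem.List.pyGetD b 0 0) with hc
  have hcpos : 0 < c := by
    rw [hc, hb]
    simp [PySem.List.pyGetD_zero_cons, List.count_cons_self]
  have hmod : PySem.Int.mod (b.length : Int) (c : Int) = ((b.length % c : Nat) : Int) :=
    PySem.Int.mod_natCast _ _
  by_cases hm : b.length % c = 0
  · rw [if_pos (by rw [hmod, hm]; simp), if_neg (by rw [hmod, hm]; simp)]
    have hdiv : PySem.Int.floordiv (b.length : Int) (c : Int) = ((b.length / c : Nat) : Int) :=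
      PySem.Int.floordiv_natCast _ _
    rw [hdiv]
    set step : Nat := b.length / c with hstep
    have hlen : b.length = c * step := by
      rw [hstep, Nat.mul_div_cancel' (Nat.dvd_of_mod_eq_zero hm)]
    have hkey := pvLoop_characterization b step (c - 1) 0 (by rw [hlen]; congr 1; omega)
    rw [Nat.zero_mul, show (0 + 1) * step = step from by omega, show c - 1 + 1 = c from by omega] at hkey
    simp only [Nat.cast_zero, List.drop_zero] at hkey
    rw [hkey]
    have hb0 : pvBlock b step 0 = b.take step := by
      rw [pvBlock, Nat.zero_mul, List.drop_zero]
    rw [hb0, PySem.List.slice_to_natCast]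
    rfl
  · rw [if_neg (by rw [hmod]; exact_mod_cast hm), if_pos (by rw [hmod]; exact_mod_cast hm)]

-- ===== VERDICT (by name: the statement is the Claim_ definition above) =====
theorem repeatingPattern_spec : Claim_equal_repeatingPattern := by
  intro a _ hpre
  exact pvPorts_agree a hpre
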